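-- pv_equiv track=rewrite | github.com/sh1k4ku/ctf-challenge | 0CTF2024/ZKPQC2/solve/exp.py | make_padding
-- ===== SOURCE A (Python) =====
-- def make_padding(length):
--     tmp = [0x80, 0x00, 0x00, 0x00, 0x00, 0x00, 0x00, 0x00, 0x00, 0x00, 0x00, 0x00, 0x00, 0x00, 0x00, 0x00,
--            0x00, 0x00, 0x00, 0x00, 0x00, 0x00, 0x00, 0x00, 0x00, 0x00, 0x00, 0x00, 0x00, 0x00, 0x00, 0x00,
--            0x00, 0x00, 0x00, 0x00, 0x00, 0x00, 0x00, 0x00, 0x00, 0x00, 0x00, 0x00, 0x00, 0x00, 0x00, 0x00,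
--            0x00, 0x00, 0x00, 0x00, 0x00, 0x00, 0x00, 0x00, 0x00, 0x00, 0x00, 0x00, 0x00, 0x00, 0x00, 0x00]
--     if length % 64 < 56:
--         padding = tmp[0:(56-length % 64)]
--     else:
--         padding = tmp[0:(64+56-length % 64)]
--     length = (length << 3)
--     for i in range(8):
--         padding.append((length >> (8*i)) % 256)
--
--     return padding
-- ===== SOURCE B (Python) =====
-- def make_padding(length):
--     # simulate the padding process: append 0x80, then zeros one at a time
--     # until the total message length is congruent to 56 mod 64, then emit
--     # the 64-bit bit-length little-endian by repeated divmod.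
--     padding = [0x80]
--     while (length + len(padding)) % 64 != 56:
--         padding.append(0x00)
--     n = length << 3
--     for _ in range(8):
--         padding.append(n % 256)
--         n //= 256
--     return padding
-- ===== Notes on version B (the rewrite author's own statement) =====
-- stated objective: alternative
-- what changed: Replaces A's branch-and-slice of a 64-byte constant table with a simulation that appends zero bytes one at a time until the running length is congruent to 56 mod 64, and replaces A's shift-indexed byte extraction with repeated divmod (n % 256, n //= 256) carrying the quotient as loop state.
import Mathlib
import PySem

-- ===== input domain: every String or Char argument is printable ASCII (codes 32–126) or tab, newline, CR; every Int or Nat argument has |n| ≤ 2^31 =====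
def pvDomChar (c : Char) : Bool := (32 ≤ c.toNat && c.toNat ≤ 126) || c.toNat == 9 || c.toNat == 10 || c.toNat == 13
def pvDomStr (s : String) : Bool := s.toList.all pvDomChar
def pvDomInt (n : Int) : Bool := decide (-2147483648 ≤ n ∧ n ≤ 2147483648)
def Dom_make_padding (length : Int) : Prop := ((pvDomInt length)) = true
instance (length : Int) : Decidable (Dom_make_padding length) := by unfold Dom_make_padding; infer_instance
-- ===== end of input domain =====

-- B simulates the padding process (append zeros one at a time until the length is
-- ≡ 56 mod 64, then emit the bit-length by repeated divmod) instead of A's if/else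
-- slicing of a 64-byte constant and shift-based byte extraction (objective: alternative).

-- ===== PORT A =====
def make_padding (length : Int) : List Int :=
  let tmp : List Int := [0x80, 0x00, 0x00, 0x00, 0x00, 0x00, 0x00, 0x00, 0x00, 0x00, 0x00, 0x00, 0x00, 0x00, 0x00, 0x00,
                         0x00, 0x00, 0x00, 0x00, 0x00, 0x00, 0x00, 0x00, 0x00, 0x00, 0x00, 0x00, 0x00, 0x00, 0x00, 0x00,
                         0x00, 0x00, 0x00, 0x00, 0x00, 0x00, 0x00, 0x00, 0x00, 0x00, 0x00, 0x00, 0x00, 0x00, 0x00, 0x00,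
                         0x00, 0x00, 0x00, 0x00, 0x00, 0x00, 0x00, 0x00, 0x00, 0x00, 0x00, 0x00, 0x00, 0x00, 0x00, 0x00]
  let padding : List Int :=
    if PySem.Int.mod length 64 < 56 then
      PySem.List.slice tmp (some 0) (some (56 - PySem.Int.mod length 64))
    else
      PySem.List.slice tmp (some 0) (some (64 + 56 - PySem.Int.mod length 64))
  let length2 : Int := length <<< (3 : Nat)
  -- for i in range(8): padding.append((length >> (8*i)) % 256)   (small nonnegative i, so Nat range is exact)
  (List.range 8).foldl (fun p i => p ++ [PySem.Int.mod (length2 >>> (8 * i : Nat)) 256]) padding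

-- ===== PORT B =====
-- while (length + len(padding)) % 64 != 56: padding.append(0x00)
-- (len = current padding length; terminates within 64 steps since the residue cycles)
def mkZeros (length : Int) (fuel : Nat) (len : Nat) : List Int :=
  match fuel with
  | 0 => []  -- never reached: the residue cycles with period 64, so 64 fuel always suffices
  | fuel + 1 =>
    if PySem.Int.mod (length + len) 64 = 56 then []
    else 0x00 :: mkZeros length fuel (len + 1)

def make_padding_alt (length : Int) : List Int :=
  let padding : List Int := [0x80] ++ mkZeros length 64 1
  let n : Int := length <<< (3 : Nat)
  -- for _ in range(8): padding.append(n % 256); n //= 256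
  ((List.range 8).foldl
    (fun (s : List Int × Int) _ => (s.1 ++ [PySem.Int.mod s.2 256], PySem.Int.floordiv s.2 256))
    (padding, n)).1

-- ===== PRECONDITION & SPEC =====
def Spec_make_padding (length : Int) (out : List Int) : Prop := out = make_padding_alt length
instance (length : Int) (out : List Int) : Decidable (Spec_make_padding length out) := by unfold Spec_make_padding; infer_instance

-- ===== CLAIM (what is proved, stated in full; the proofs are below) =====
def Claim_equal_make_padding : Prop := ∀ (length : Int), Dom_make_padding length → Spec_make_padding length (make_padding length)

-- ===== LEMMAS AND PROOFS =====

-- B's while loop produces exactly ((56 - (length+len)) mod 64) zeros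
theorem mkZeros_eq (length : Int) :
    ∀ (k : Nat), ∀ (fuel len : Nat), ((56 - (length + len)) % 64).toNat = k → k ≤ fuel →
      mkZeros length fuel len = List.replicate k (0x00 : Int) := by
  intro k
  induction k with
  | zero =>
    intro fuel len h _
    cases fuel with
    | zero => rfl
    | succ f =>
      have hc : PySem.Int.mod (length + len) 64 = 56 := by
        rw [PySem.Int.mod_eq_emod_of_pos (by norm_num : (0:Int) < 64)]
        omega
      simp only [mkZeros]
      rw [if_pos hc]
      rfl
  | succ k ih =>
    intro fuel len h hle
    cases fuel with
    | zero => omega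
    | succ f =>
      have hne : ¬ PySem.Int.mod (length + len) 64 = 56 := by
        rw [PySem.Int.mod_eq_emod_of_pos (by norm_num : (0:Int) < 64)]
        omega
      simp only [mkZeros, if_neg hne]
      rw [ih f (len + 1) (by push_cast; omega) (by omega)]
      rfl

-- A's sliced zero-run agrees with B's simulated one (by cases on the residue)
theorem pad_eq (r : Int) (h0 : 0 ≤ r) (h1 : r < 64) :
    (if r < 56 then
      PySem.List.slice ([0x80, 0x00, 0x00, 0x00, 0x00, 0x00, 0x00, 0x00, 0x00, 0x00, 0x00, 0x00, 0x00, 0x00, 0x00, 0x00,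
                         0x00, 0x00, 0x00, 0x00, 0x00, 0x00, 0x00, 0x00, 0x00, 0x00, 0x00, 0x00, 0x00, 0x00, 0x00, 0x00,
                         0x00, 0x00, 0x00, 0x00, 0x00, 0x00, 0x00, 0x00, 0x00, 0x00, 0x00, 0x00, 0x00, 0x00, 0x00, 0x00,
                         0x00, 0x00, 0x00, 0x00, 0x00, 0x00, 0x00, 0x00, 0x00, 0x00, 0x00, 0x00, 0x00, 0x00, 0x00, 0x00] : List Int)
        (some 0) (some (56 - r))
    else
      PySem.List.slice ([0x80, 0x00, 0x00, 0x00, 0x00, 0x00, 0x00, 0x00, 0x00, 0x00, 0x00, 0x00, 0x00, 0x00, 0x00, 0x00,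
                         0x00, 0x00, 0x00, 0x00, 0x00, 0x00, 0x00, 0x00, 0x00, 0x00, 0x00, 0x00, 0x00, 0x00, 0x00, 0x00,
                         0x00, 0x00, 0x00, 0x00, 0x00, 0x00, 0x00, 0x00, 0x00, 0x00, 0x00, 0x00, 0x00, 0x00, 0x00, 0x00,
                         0x00, 0x00, 0x00, 0x00, 0x00, 0x00, 0x00, 0x00, 0x00, 0x00, 0x00, 0x00, 0x00, 0x00, 0x00, 0x00] : List Int)
        (some 0) (some (64 + 56 - r)))
    = [0x80] ++ List.replicate (((55 - r) % 64).toNat) (0x00 : Int) := by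
  interval_cases r <;> decide

-- repeated floor division by 256 is an arithmetic right shift by 8
theorem floordiv256_shift (n : Int) (j : Nat) :
    PySem.Int.floordiv (n >>> j) 256 = n >>> (j + 8) := by
  rw [PySem.Int.floordiv_eq_ediv_of_pos (by norm_num : (0:Int) < 256),
      Int.shiftRight_eq_div_pow, Int.shiftRight_eq_div_pow]
  push_cast
  rw [Int.ediv_ediv_of_nonneg]
  · norm_num [pow_add]
  · positivity

theorem floordiv256_shift0 (n : Int) :
    PySem.Int.floordiv n 256 = n >>> (8 : Nat) := by
  have h := floordiv256_shift n 0
  simpa using h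

theorem make_padding_spec : Claim_equal_make_padding := by
  intro length _
  unfold Spec_make_padding make_padding make_padding_alt
  simp only []
  have h0 : 0 ≤ PySem.Int.mod length 64 := PySem.Int.mod_nonneg _ (by norm_num)
  have h1 : PySem.Int.mod length 64 < 64 := PySem.Int.mod_lt _ (by norm_num)
  have hz : mkZeros length 64 1 = List.replicate (((55 - PySem.Int.mod length 64) % 64).toNat) (0x00 : Int) := by
    apply mkZeros_eq
    · rw [PySem.Int.mod_eq_emod_of_pos (by norm_num : (0:Int) < 64)]
      push_cast
      omega
    · rw [PySem.Int.mod_eq_emod_of_pos (by norm_num : (0:Int) < 64)]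
      omega
  rw [hz, pad_eq (PySem.Int.mod length 64) h0 h1]
  have hr : List.range 8 = [0,1,2,3,4,5,6,7] := rfl
  rw [hr]
  simp only [List.foldl, floordiv256_shift0]
  norm_num [← Int.shiftRight_add]
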